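-- pv_equiv track=rewrite | github.com/dennisvink/knightmare | pipeline/data_preparation.py | get_buckets_for_position
-- ===== SOURCE A (Python) =====
-- MOVE_BUCKETS = [
--     (0, 10), (10, 20), (20, 30),
--     (30, 40), (40, 50), (50, 70), (70, 10_000)
-- ]
--
-- BUCKET_NAMES = ["1-10", "11-20", "21-30", "31-40", "41-50", "51-70", "71+"]
--
-- def get_buckets_for_position(idx, total_moves):
--     buckets = []
--     if total_moves - idx <= 10:
--         buckets.append("mating")
--     for (start, end), name in zip(MOVE_BUCKETS, BUCKET_NAMES):
--         if start <= idx < end: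
--             buckets.append(name)
--             break
--     return buckets
-- ===== SOURCE B (Python) =====
-- BOUNDS = [10, 20, 30, 40, 50, 70]
-- BUCKET_NAMES = ["1-10", "11-20", "21-30", "31-40", "41-50", "51-70", "71+"]
--
-- def get_buckets_for_position(idx, total_moves):
--     buckets = ["mating"] if total_moves - idx <= 10 else []
--     if 0 <= idx < 10_000:
--         lo, hi = 0, len(BOUNDS)
--         while lo < hi:
--             mid = (lo + hi) // 2
--             if BOUNDS[mid] <= idx:
--                 lo = mid + 1
--             else:
--                 hi = mid
--         buckets.append(BUCKET_NAMES[lo])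
--     return buckets
-- ===== Notes on version B (the rewrite author's own statement) =====
-- stated objective: alternative
-- what changed: Replaced the linear scan over (start,end) interval pairs with a range guard 0 <= idx < 10000 plus a binary search over the sorted upper bounds that picks the bucket name directly.
import Mathlib
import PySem

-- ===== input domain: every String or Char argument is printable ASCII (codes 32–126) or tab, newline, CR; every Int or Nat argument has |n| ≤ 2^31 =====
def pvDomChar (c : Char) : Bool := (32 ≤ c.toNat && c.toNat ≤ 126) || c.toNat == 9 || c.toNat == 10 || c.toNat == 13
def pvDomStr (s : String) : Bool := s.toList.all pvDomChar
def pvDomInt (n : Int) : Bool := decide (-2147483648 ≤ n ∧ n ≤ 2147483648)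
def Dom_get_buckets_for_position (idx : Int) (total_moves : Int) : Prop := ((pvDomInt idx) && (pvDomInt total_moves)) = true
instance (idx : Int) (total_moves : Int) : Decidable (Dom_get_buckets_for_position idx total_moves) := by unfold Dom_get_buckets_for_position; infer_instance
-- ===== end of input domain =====

-- B replaces the linear interval scan with a range guard and a binary search over the sorted upper bounds (alternative algorithm, same cost at this size).
-- ===== PORT A =====
def MOVE_BUCKETS : List (Int × Int) :=
  [(0,10),(10,20),(20,30),(30,40),(40,50),(50,70),(70,10000)]

def BUCKET_NAMES : List String := ["1-10", "11-20", "21-30", "31-40", "41-50", "51-70", "71+"]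

-- the for-loop with break over zip(MOVE_BUCKETS, BUCKET_NAMES)
def scanBuckets (idx : Int) : List ((Int × Int) × String) → List String
  | [] => []
  | ((s, e), name) :: rest =>
      if s ≤ idx ∧ idx < e then [name] else scanBuckets idx rest

def get_buckets_for_position (idx : Int) (total_moves : Int) : List String :=
  let buckets : List String := if total_moves - idx ≤ 10 then ["mating"] else []
  buckets ++ scanBuckets idx (MOVE_BUCKETS.zip BUCKET_NAMES)

-- ===== PORT B =====
def BOUNDS : List Int := [10, 20, 30, 40, 50, 70]

-- the while lo < hi binary-search loop of Source B
def bisectLoop (idx : Int) (lo hi : Nat) : Nat :=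
  if lo < hi then
    let mid := (lo + hi) / 2
    if BOUNDS.getD mid 0 ≤ idx then bisectLoop idx (mid + 1) hi
    else bisectLoop idx lo mid
  else lo
  termination_by hi - lo
  decreasing_by all_goals omega

def get_buckets_for_position_alt (idx : Int) (total_moves : Int) : List String :=
  let buckets : List String := if total_moves - idx ≤ 10 then ["mating"] else []
  if 0 ≤ idx ∧ idx < 10000 then
    buckets ++ [BUCKET_NAMES.getD (bisectLoop idx 0 BOUNDS.length) ""]
  else buckets

-- ===== PRECONDITION & SPEC =====
def Spec_get_buckets_for_position (idx : Int) (total_moves : Int) (out : List String) : Prop := out = get_buckets_for_position_alt idx total_moves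
instance (idx : Int) (total_moves : Int) (out : List String) : Decidable (Spec_get_buckets_for_position idx total_moves out) := by unfold Spec_get_buckets_for_position; infer_instance

-- ===== CLAIM (what is proved, stated in full; the proofs are below) =====
def Claim_equal_get_buckets_for_position : Prop := ∀ (idx : Int) (total_moves : Int), Dom_get_buckets_for_position idx total_moves → Spec_get_buckets_for_position idx total_moves (get_buckets_for_position idx total_moves)

-- ===== LEMMAS AND PROOFS =====
lemma b_term (idx : Int) (lo : Nat) : bisectLoop idx lo lo = lo := by
  rw [bisectLoop]; simp

lemma b01 (idx : Int) : bisectLoop idx 0 1 = if 10 ≤ idx then 1 else 0 := by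
  rw [bisectLoop]; simp [BOUNDS, b_term]

lemma b23 (idx : Int) : bisectLoop idx 2 3 = if 30 ≤ idx then 3 else 2 := by
  rw [bisectLoop]; simp [BOUNDS, b_term]

lemma b03 (idx : Int) : bisectLoop idx 0 3 =
    if 20 ≤ idx then (if 30 ≤ idx then 3 else 2) else if 10 ≤ idx then 1 else 0 := by
  rw [bisectLoop]; simp [BOUNDS, b23, b01]

lemma b45 (idx : Int) : bisectLoop idx 4 5 = if 50 ≤ idx then 5 else 4 := by
  rw [bisectLoop]; simp [BOUNDS, b_term]

lemma b46 (idx : Int) : bisectLoop idx 4 6 =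
    if 70 ≤ idx then 6 else if 50 ≤ idx then 5 else 4 := by
  rw [bisectLoop]; simp [BOUNDS, b45, b_term]

lemma bisect_eval (idx : Int) : bisectLoop idx 0 BOUNDS.length =
    if 40 ≤ idx then (if 70 ≤ idx then 6 else if 50 ≤ idx then 5 else 4)
    else if 20 ≤ idx then (if 30 ≤ idx then 3 else 2) else if 10 ≤ idx then 1 else 0 := by
  show bisectLoop idx 0 6 = _
  rw [bisectLoop]; simp [BOUNDS, b46, b03]

lemma scan_eval (idx : Int) : scanBuckets idx (MOVE_BUCKETS.zip BUCKET_NAMES) =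
    if 0 ≤ idx ∧ idx < 10000 then [BUCKET_NAMES.getD (bisectLoop idx 0 BOUNDS.length) ""] else [] := by
  rw [bisect_eval]
  simp only [MOVE_BUCKETS, BUCKET_NAMES, List.zip, List.zipWith, scanBuckets]
  split_ifs <;> simp_all [List.getD] <;> omega

-- ===== VERDICT (by name: the statement is the Claim_ definition above) =====
theorem get_buckets_for_position_spec : Claim_equal_get_buckets_for_position := by
  intro idx total_moves _
  unfold Spec_get_buckets_for_position get_buckets_for_position get_buckets_for_position_alt
  rw [scan_eval]
  split_ifs <;> simp
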